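-- pv_equiv track=rewrite | github.com/despawnerer/pokerish | pokerish.py | is_strict_sequence
-- ===== SOURCE A (Python) =====
-- def is_strict_sequence(iterable_of_integers):
--     iterator = iter(iterable_of_integers)
--     try:
--         first, second = next(iterator), next(iterator)
--         while second - first == 1:
--             first, second = second, next(iterator)
--         return False
--     except StopIteration:
--         return True
-- ===== SOURCE B (Python) =====
-- def is_strict_sequence(iterable_of_integers):
--     items = list(iterable_of_integers)
--     return len({x - i for i, x in enumerate(items)}) <= 1
-- ===== Notes on version B (the rewrite author's own statement) =====
-- stated objective: idiomatic
-- what changed: Replaces A's streaming pairwise while-loop with early return by the value-minus-index invariant: the offsets {x - i} form a single constant exactly for a strictly consecutive run, so B builds that set and tests its cardinality.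
import Mathlib
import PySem

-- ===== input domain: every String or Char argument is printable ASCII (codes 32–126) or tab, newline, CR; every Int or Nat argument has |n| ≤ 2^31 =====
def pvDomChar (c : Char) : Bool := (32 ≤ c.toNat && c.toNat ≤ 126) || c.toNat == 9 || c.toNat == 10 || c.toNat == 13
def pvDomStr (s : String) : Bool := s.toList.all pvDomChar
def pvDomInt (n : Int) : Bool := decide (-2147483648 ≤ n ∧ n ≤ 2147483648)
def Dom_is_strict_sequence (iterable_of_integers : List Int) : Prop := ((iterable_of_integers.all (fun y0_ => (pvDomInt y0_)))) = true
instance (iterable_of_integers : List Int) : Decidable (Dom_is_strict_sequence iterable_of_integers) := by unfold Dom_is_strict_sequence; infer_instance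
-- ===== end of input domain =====

-- B replaces A's streaming pairwise while-loop with the value-minus-index invariant:
-- offsets {x - i} are a single constant exactly for a strictly consecutive run (idiomatic rewrite).


-- ===== PORT A =====
-- the 'while second - first == 1' loop: first two values already drawn; StopIteration inside the loop → True
def pvLoopA : Int → Int → List Int → Bool
  | first, second, rest =>
    if second - first = 1 then
      match rest with
      | [] => true                  -- next(iterator) raises StopIteration → return True
      | c :: r => pvLoopA second c r
    else false                      -- loop exits normally → return False

def is_strict_sequence (iterable_of_integers : List Int) : Bool :=
  match iterable_of_integers with
  | a :: b :: rest => pvLoopA a b rest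
  | _ => true                       -- next() for first/second raises StopIteration → return True

-- ===== PORT B =====
def is_strict_sequence_alt (iterable_of_integers : List Int) : Bool :=
  let items := iterable_of_integers
  decide ((PySem.Set.ofList ((PySem.List.enumerate items 0).map (fun p => p.2 - p.1))).length ≤ 1)

-- ===== PRECONDITION & SPEC =====
def Spec_is_strict_sequence (iterable_of_integers : List Int) (out : Bool) : Prop := out = is_strict_sequence_alt iterable_of_integers
instance (iterable_of_integers : List Int) (out : Bool) : Decidable (Spec_is_strict_sequence iterable_of_integers out) := by unfold Spec_is_strict_sequence; infer_instance

-- ===== CLAIM (what is proved, stated in full; the proofs are below) =====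
def Claim_equal_is_strict_sequence : Prop := ∀ (iterable_of_integers : List Int), Dom_is_strict_sequence iterable_of_integers → Spec_is_strict_sequence iterable_of_integers (is_strict_sequence iterable_of_integers)

-- ===== LEMMAS AND PROOFS =====

-- "adjacent elements differ by exactly 1, each next = prev + 1"
def pvAdj (xs : List Int) : Prop := ∀ k : Nat, (h : k + 1 < xs.length) → xs[k+1] = xs[k] + 1

theorem pvAdj_cons_cons (a b : Int) (r : List Int) :
    pvAdj (a :: b :: r) ↔ (b = a + 1 ∧ pvAdj (b :: r)) := by
  constructor
  · intro h
    refine ⟨h 0 (by simp), ?_⟩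
    intro k hk
    have := h (k+1) (by simp only [List.length_cons] at hk ⊢; omega)
    simpa using this
  · rintro ⟨h1, h2⟩ k hk
    cases k with
    | zero => simpa using h1
    | succ k =>
      have := h2 k (by simp only [List.length_cons] at hk ⊢; omega)
      simpa using this

theorem pvLoopA_iff (r : List Int) : ∀ a b : Int, pvLoopA a b r = true ↔ pvAdj (a :: b :: r) := by
  induction r with
  | nil =>
    intro a b
    rw [pvLoopA, pvAdj_cons_cons]
    constructor
    · intro h
      split at h
      · refine ⟨by omega, ?_⟩
        intro k hk; simp at hk
      · exact absurd h (by simp)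
    · rintro ⟨h1, _⟩; simp [show b - a = 1 by omega]
  | cons c r ih =>
    intro a b
    rw [pvLoopA, pvAdj_cons_cons]
    constructor
    · intro h
      split at h
      · exact ⟨by omega, (ih b c).mp h⟩
      · exact absurd h (by simp)
    · rintro ⟨h1, h2⟩
      simp only [show b - a = 1 by omega]
      exact (ih b c).mpr h2

theorem pvA_iff (xs : List Int) : is_strict_sequence xs = true ↔ pvAdj xs := by
  match xs with
  | [] => simp [is_strict_sequence, pvAdj]
  | [a] =>
    refine ⟨fun _ k hk => ?_, fun _ => rfl⟩
    simp at hk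
  | a :: b :: r => exact pvLoopA_iff r a b

-- a Python set has ≤ 1 element iff all elements fed into it are equal
theorem pvSetLen_le_one_iff (l : List Int) :
    (PySem.Set.ofList l).length ≤ 1 ↔ ∀ x ∈ l, ∀ y ∈ l, x = y := by
  constructor
  · intro h x hx y hy
    have hx' : x ∈ PySem.Set.ofList l := (PySem.Set.mem_ofList _ _).mpr hx
    have hy' : y ∈ PySem.Set.ofList l := (PySem.Set.mem_ofList _ _).mpr hy
    match hs : PySem.Set.ofList l with
    | [] => rw [hs] at hx'; simp at hx'
    | [c] =>
      rw [hs] at hx' hy'; simp at hx' hy'; omega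
    | c :: d :: t => rw [hs] at h; simp at h
  · intro h
    have hnd := PySem.Set.nodup_ofList (xs := l)
    match hs : PySem.Set.ofList l with
    | [] => simp
    | [c] => simp
    | c :: d :: t =>
      exfalso
      have hc : c ∈ l := (PySem.Set.mem_ofList _ _).mp (by rw [hs]; simp)
      have hd : d ∈ l := (PySem.Set.mem_ofList _ _).mp (by rw [hs]; simp)
      rw [hs] at hnd
      simp [List.nodup_cons] at hnd
      exact hnd.1.1 (h c hc d hd)

-- membership in the offsets list
theorem pvMem_offsets (xs : List Int) (x : Int) :
    x ∈ (PySem.List.enumerate xs 0).map (fun p => p.2 - p.1) ↔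
      ∃ (k : Nat) (h : k < xs.length), x = xs[k] - (k : Int) := by
  simp only [List.mem_map, PySem.List.mem_enumerate_iff]
  constructor
  · rintro ⟨p, ⟨k, h, rfl⟩, rfl⟩
    exact ⟨k, h, by simp⟩
  · rintro ⟨k, h, rfl⟩
    exact ⟨((k : Int), xs[k]), ⟨k, h, by simp⟩, by simp⟩

theorem pvAdj_offset (xs : List Int) (h : pvAdj xs) :
    ∀ k : Nat, (hk : k < xs.length) → ∀ j : Nat, (hj : j < xs.length) →
      xs[k] - (k : Int) = xs[j] - (j : Int) := by
  have key : ∀ k : Nat, (hk : k < xs.length) → ∀ h0 : 0 < xs.length,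
      xs[k] = xs[0] + (k : Int) := by
    intro k
    induction k with
    | zero => intro hk h0; simp
    | succ k ih =>
      intro hk h0
      have h1 := h k (by omega)
      have h2 := ih (by omega) h0
      push_cast
      omega
  intro k hk j hj
  have h0 : 0 < xs.length := by omega
  have := key k hk h0
  have := key j hj h0
  omega

theorem pvOffset_adj (xs : List Int)
    (h : ∀ k : Nat, (hk : k < xs.length) → ∀ j : Nat, (hj : j < xs.length) →
      xs[k] - (k : Int) = xs[j] - (j : Int)) : pvAdj xs := by
  intro k hk
  have := h (k+1) hk k (by omega)
  push_cast at this
  omega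

theorem pvB_iff (xs : List Int) : is_strict_sequence_alt xs = true ↔ pvAdj xs := by
  simp only [is_strict_sequence_alt, decide_eq_true_eq]
  rw [pvSetLen_le_one_iff]
  constructor
  · intro h
    apply pvOffset_adj
    intro k hk j hj
    exact h _ ((pvMem_offsets xs _).mpr ⟨k, hk, rfl⟩) _ ((pvMem_offsets xs _).mpr ⟨j, hj, rfl⟩)
  · intro h x hx y hy
    obtain ⟨k, hk, rfl⟩ := (pvMem_offsets xs x).mp hx
    obtain ⟨j, hj, rfl⟩ := (pvMem_offsets xs y).mp hy
    exact pvAdj_offset xs h k hk j hj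

-- ===== VERDICT (by name: the statement is the Claim_ definition above) =====
theorem is_strict_sequence_spec : Claim_equal_is_strict_sequence := by
  intro xs _
  unfold Spec_is_strict_sequence
  have ha := pvA_iff xs
  have hb := pvB_iff xs
  cases h1 : is_strict_sequence xs <;> cases h2 : is_strict_sequence_alt xs <;>
    simp_all
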